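-- pv_equiv track=rewrite | github.com/grassedprogrammer/slowthon | termine/Termine_tools.py | get_dict_index_value
-- ===== SOURCE A (Python) =====
-- def get_dict_index_value(thing, index, normal):
--     if normal == True:
--         index+=1
--     for key, value in thing.items():
--         index-=1
--         if index < 1:
--             return key, value
--     return None
-- ===== SOURCE B (Python) =====
-- def get_dict_index_value(thing, index, normal):
--     items = list(thing.items())
--     if not items:
--         return None
--     pos = (index + 1 if normal == True else index) - 1
--     if pos < 0:
--         pos = 0
--     if pos < len(items):
--         return items[pos]
--     return None
-- ===== Notes on version B (the rewrite author's own statement) =====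
-- stated objective: simpler
-- what changed: Replaces the decrement-and-scan loop over the items with a single computed, clamped position and one direct list index into the materialised items.
import Mathlib
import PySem

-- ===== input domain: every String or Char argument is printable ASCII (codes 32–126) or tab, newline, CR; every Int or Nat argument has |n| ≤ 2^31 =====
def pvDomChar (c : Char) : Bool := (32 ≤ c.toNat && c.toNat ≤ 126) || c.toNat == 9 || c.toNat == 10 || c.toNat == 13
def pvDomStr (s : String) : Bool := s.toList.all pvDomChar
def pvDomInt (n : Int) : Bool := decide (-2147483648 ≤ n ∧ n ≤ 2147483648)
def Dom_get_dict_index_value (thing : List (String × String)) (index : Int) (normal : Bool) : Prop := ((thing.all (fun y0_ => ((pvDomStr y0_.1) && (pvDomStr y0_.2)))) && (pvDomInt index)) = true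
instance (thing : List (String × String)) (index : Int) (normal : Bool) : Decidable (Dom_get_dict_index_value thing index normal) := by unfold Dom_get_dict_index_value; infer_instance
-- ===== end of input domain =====

-- B replaces A's decrement-and-scan loop with one clamped position and a direct index (objective: simpler).
-- ===== PORT A =====
-- A's for-loop over thing.items() with the mutating 'index', early-returning when index < 1
def pvLoopA (thing : List (String × String)) (index : Int) : Option (String × String) :=
  match thing with
  | [] => none
  | (key, value) :: rest =>
    let index := index - 1
    if index < 1 then some (key, value) else pvLoopA rest index

def get_dict_index_value (thing : List (String × String)) (index : Int) (normal : Bool) : Option (String × String) :=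
  let index := if normal == true then index + 1 else index
  pvLoopA thing index

-- ===== PORT B =====
def get_dict_index_value_alt (thing : List (String × String)) (index : Int) (normal : Bool) : Option (String × String) :=
  let items := thing
  if items = [] then none
  else
    let pos := (if normal == true then index + 1 else index) - 1
    let pos := if pos < 0 then 0 else pos
    if pos < (items.length : Int) then PySem.List.pyGet? items pos else none

-- ===== PRECONDITION & SPEC =====
def Spec_get_dict_index_value (thing : List (String × String)) (index : Int) (normal : Bool) (out : Option (String × String)) : Prop := out = get_dict_index_value_alt thing index normal
instance (thing : List (String × String)) (index : Int) (normal : Bool) (out : Option (String × String)) : Decidable (Spec_get_dict_index_value thing index normal out) := by unfold Spec_get_dict_index_value; infer_instance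

-- ===== CLAIM (what is proved, stated in full; the proofs are below) =====
def Claim_equal_get_dict_index_value : Prop := ∀ (thing : List (String × String)) (index : Int) (normal : Bool), Dom_get_dict_index_value thing index normal → Spec_get_dict_index_value thing index normal (get_dict_index_value thing index normal)

-- ===== LEMMAS AND PROOFS =====
-- core equivalence: the scanning loop equals clamp-then-index, for any running index j
theorem pvLoopA_eq (thing : List (String × String)) (j : Int) :
    pvLoopA thing j =
      (if thing = [] then none
       else
         if (if j - 1 < 0 then 0 else j - 1) < (thing.length : Int) then
           PySem.List.pyGet? thing (if j - 1 < 0 then (0 : Int) else j - 1)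
         else none) := by
  induction thing generalizing j with
  | nil => simp [pvLoopA]
  | cons hd tl ih =>
    obtain ⟨k, v⟩ := hd
    by_cases h1 : j - 1 < 1
    · have hP : (if (j - 1 : Int) < 0 then (0 : Int) else j - 1) = 0 := by split <;> omega
      simp only [pvLoopA, if_pos h1, hP]
      rw [if_neg (by simp : ¬ ((k, v) :: tl = []))]
      rw [if_pos (by simp : (0 : Int) < (((k, v) :: tl).length : Int))]
      simp [PySem.List.pyGet?, PySem.List.pyIdx?]
    · have hP : (if (j - 1 : Int) < 0 then (0 : Int) else j - 1) = j - 1 := by split <;> omega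
      have hP' : (if (j - 1 - 1 : Int) < 0 then (0 : Int) else j - 1 - 1) = j - 2 := by
        split <;> omega
      simp only [pvLoopA, if_neg h1]
      rw [ih (j - 1), hP']
      rw [if_neg (by simp : ¬ ((k, v) :: tl = []))]
      rw [hP]
      by_cases htl : tl = []
      · subst htl
        rw [if_pos rfl, if_neg (by simp; omega)]
      · rw [if_neg htl]
        by_cases hin : (j - 2 : Int) < (tl.length : Int)
        · rw [if_pos hin, if_pos (by simp; omega)]
          rw [PySem.List.pyGet?_of_nonneg tl (by omega), PySem.List.pyGet?_of_nonneg ((k, v) :: tl) (by omega)]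
          have ht : (j - 1).toNat = (j - 2).toNat + 1 := by omega
          rw [ht]
          simp
        · rw [if_neg hin, if_neg (by simp; omega)]

-- ===== VERDICT (by name: the statement is the Claim_ definition above) =====
theorem get_dict_index_value_spec : Claim_equal_get_dict_index_value := by
  intro thing index normal _
  unfold Spec_get_dict_index_value
  exact pvLoopA_eq thing (if normal == true then index + 1 else index)
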